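-- pv_equiv track=rewrite | github.com/Ben10164/cordiality | tests/L17/test_MinAbsSum.py | official_solution
-- ===== SOURCE A (Python) =====
-- def official_solution(A):
--     N = len(A)
--     M = 0
--     for i in range(N):
--         A[i] = abs(A[i])
--         M = max(A[i], M)
--     S = sum(A)
--     count = [0] * (M + 1)
--     for i in range(N):
--         count[A[i]] += 1
--     dp = [-1] * (S + 1)
--     dp[0] = 0
--     for a in range(1, M + 1):
--         if count[a] > 0:
--             for j in range(S):
--                 if dp[j] >= 0:
--                     dp[j] = count[a]
--                 elif j >= a and dp[j - a] > 0:
--                     dp[j] = dp[j - a] - 1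
--     result = S
--     for i in range(S // 2 + 1):
--         if dp[i] >= 0:
--             result = min(result, S - 2 * i)
--     return result
-- ===== SOURCE B (Python) =====
-- def official_solution(A):
--     # Mutates A in place to absolute values, like the original.
--     for i in range(len(A)):
--         A[i] = abs(A[i])
--     S = sum(A)
--     reach = {0}
--     for v in A:
--         reach |= {r + v for r in reach}
--     best = 0
--     for r in reach:
--         if 2 * r <= S and r > best:
--             best = r
--     return S - 2 * best
-- ===== Notes on version B (the rewrite author's own statement) =====
-- stated objective: simpler
-- what changed: Replaces the count-array bounded-knapsack dp over distinct values 1..M by a direct per-element subset-sum reachability set, returning S minus twice the largest reachable sum not exceeding S/2 (same in-place abs mutation of A).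
import Mathlib
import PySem

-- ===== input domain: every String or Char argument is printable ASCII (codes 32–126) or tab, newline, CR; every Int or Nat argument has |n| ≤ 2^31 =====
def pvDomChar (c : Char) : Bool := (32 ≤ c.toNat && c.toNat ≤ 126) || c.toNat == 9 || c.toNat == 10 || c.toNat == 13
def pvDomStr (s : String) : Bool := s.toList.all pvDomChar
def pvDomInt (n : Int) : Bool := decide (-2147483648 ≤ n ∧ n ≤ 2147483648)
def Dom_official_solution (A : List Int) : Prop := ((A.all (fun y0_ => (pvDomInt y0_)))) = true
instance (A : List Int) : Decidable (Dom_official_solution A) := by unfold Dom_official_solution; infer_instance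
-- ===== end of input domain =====

-- B replaces the count-array bounded-knapsack dp over values 1..M by a per-element subset-sum
-- reachability set (objective: simpler). Both Pythons mutate A in place to absolute values the
-- same way; the equivalence proved here is about the return value.


-- ===== PORT A =====
-- One step of the inner `for j in range(S)` body (j, a are the nonnegative Python ints;
-- Nat `j - a` is exact because it is guarded by `a ≤ j`).
def stepA (c : Int) (a : Nat) (dp : Array Int) (j : Nat) : Array Int :=
  if 0 ≤ dp.getD j (-1) then dp.setIfInBounds j c
  else if a ≤ j ∧ 0 < dp.getD (j - a) (-1) then dp.setIfInBounds j (dp.getD (j - a) (-1) - 1)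
  else dp

-- `for j in range(t)` over the inner body (called with t = S)
def innerA (c : Int) (a : Nat) (dp : Array Int) (t : Nat) : Array Int :=
  (List.range t).foldl (stepA c a) dp

-- `for a in range(1, M+1)` (the foldl index t runs over 0..M-1, the value is a = t+1)
def outerA (cnt : Array Int) (S : Nat) (dp : Array Int) (M : Nat) : Array Int :=
  (List.range M).foldl
    (fun dp t => if 0 < cnt.getD (t + 1) 0 then innerA (cnt.getD (t + 1) 0) (t + 1) dp S else dp) dp

-- the final `for i in range(S//2 + 1)` loop (result accumulator starts at S)
def finalA (S : Int) (dp : Array Int) (T : Nat) : Int :=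
  (List.range T).foldl (fun r t => if 0 ≤ dp.getD t (-1) then min r (S - 2 * (t : Int)) else r) S

-- `count[A[i]] += 1` loop; A[i] = |A[i]| ≥ 0 so `.toNat` is exact, and |A[i]| ≤ M keeps it in range.
def buildCnt (l : List Int) (acc : Array Int) : Array Int :=
  l.foldl (fun c v => c.setIfInBounds v.toNat (c.getD v.toNat 0 + 1)) acc

def official_solution (A : List Int) : Int :=
  -- Python's first loop rewrites A[i] := abs(A[i]) and tracks M = max(A[i], M); ported as map + foldl max.
  let vals := A.map (fun x => |x|)
  let M := vals.foldl max 0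
  let S := vals.sum
  let cnt := buildCnt vals (Array.replicate (M.toNat + 1) 0)
  let dp0 := (Array.replicate (S.toNat + 1) (-1 : Int)).setIfInBounds 0 0
  let dp := outerA cnt S.toNat dp0 M.toNat
  -- range(S//2 + 1): S ≥ 0 here, so S//2 = S.toNat / 2 exactly
  finalA S dp (S.toNat / 2 + 1)

-- ===== PORT B =====
-- `reach |= {r + v for r in reach}` for each v (result depends on reach only as a set)
def reachFold (l : List Int) (s : PySem.Set Int) : PySem.Set Int :=
  l.foldl (fun s v => PySem.Set.union s (s.map (fun r => r + v))) s

-- `for r in reach: if 2*r <= S and r > best: best = r` (a max: order-independent)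
def bestFold (S : Int) (L : List Int) (b0 : Int) : Int :=
  L.foldl (fun b r => if 2 * r ≤ S ∧ b < r then r else b) b0

def official_solution_alt (A : List Int) : Int :=
  let vals := A.map (fun x => |x|)
  let S := vals.sum
  let reach := reachFold vals (PySem.Set.ofList [0])
  let best := bestFold S reach 0
  S - 2 * best

-- ===== PRECONDITION & SPEC =====
def Spec_official_solution (A : List Int) (out : Int) : Prop := out = official_solution_alt A
instance (A : List Int) (out : Int) : Decidable (Spec_official_solution A out) := by unfold Spec_official_solution; infer_instance

-- ===== CLAIM (what is proved, stated in full; the proofs are below) =====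
def Claim_equal_official_solution : Prop := ∀ (A : List Int), Dom_official_solution A → Spec_official_solution A (official_solution A)

-- ===== LEMMAS AND PROOFS =====

-- j is a subset sum of l (each element used at most once)
def Choose : List Int → Int → Prop
  | [], j => j = 0
  | v :: l, j => Choose l j ∨ Choose l (j - v)

-- j is a sum Σ k_b · b over values b = 1..a with 0 ≤ k_b ≤ f b
def GReach (f : Nat → Nat) : Nat → Int → Prop
  | 0, j => j = 0
  | a + 1, j => ∃ k : Nat, k ≤ f (a + 1) ∧ GReach f a (j - (k : Int) * ((a : Int) + 1))

lemma choose_nonneg {l : List Int} (h : ∀ v ∈ l, 0 ≤ v) : ∀ {j : Int}, Choose l j → 0 ≤ j := by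
  induction l with
  | nil => intro j hj; simp [Choose] at hj; omega
  | cons v l ih =>
      intro j hj
      have hv : 0 ≤ v := h v (by simp)
      have h' : ∀ w ∈ l, 0 ≤ w := fun w hw => h w (by simp [hw])
      rcases hj with hj | hj
      · exact ih h' hj
      · have := ih h' hj; omega

lemma choose_perm {l l' : List Int} (h : l.Perm l') : ∀ j, Choose l j ↔ Choose l' j := by
  induction h with
  | nil => intro j; rfl
  | cons x h ih => intro j; simp only [Choose]; rw [ih j, ih (j - x)]
  | swap x y l =>
      intro j
      simp only [Choose]
      constructor
      · rintro ((h | h) | (h | h))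
        · exact Or.inl (Or.inl h)
        · exact Or.inr (Or.inl h)
        · exact Or.inl (Or.inr h)
        · refine Or.inr (Or.inr ?_); rwa [sub_right_comm]
      · rintro ((h | h) | (h | h))
        · exact Or.inl (Or.inl h)
        · exact Or.inr (Or.inl h)
        · exact Or.inl (Or.inr h)
        · refine Or.inr (Or.inr ?_); rwa [sub_right_comm]
  | trans h1 h2 ih1 ih2 => intro j; rw [ih1 j, ih2 j]

lemma choose_replicate (v : Int) (r : List Int) :
    ∀ (n : Nat) (j : Int), Choose (List.replicate n v ++ r) j ↔ ∃ k : Nat, k ≤ n ∧ Choose r (j - (k : Int) * v) := by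
  intro n
  induction n with
  | zero =>
      intro j
      constructor
      · intro h; exact ⟨0, le_refl _, by simpa using h⟩
      · rintro ⟨k, hk, h⟩; interval_cases k; simpa using h
  | succ n ih =>
      intro j
      simp only [List.replicate_succ, List.cons_append, Choose, ih]
      constructor
      · rintro (⟨k, hk, h⟩ | ⟨k, hk, h⟩)
        · exact ⟨k, by omega, h⟩
        · refine ⟨k + 1, by omega, ?_⟩
          have : j - (↑(k + 1) : Int) * v = j - v - (k : Int) * v := by push_cast; ring
          rwa [this]
      · rintro ⟨k, hk, h⟩
        rcases Nat.lt_or_ge k (n + 1) with hk' | hk'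
        · exact Or.inl ⟨k, by omega, h⟩
        · have hkn : k = n + 1 := by omega
          subst hkn
          refine Or.inr ⟨n, le_refl _, ?_⟩
          have : j - v - (n : Int) * v = j - (↑(n + 1) : Int) * v := by push_cast; ring
          rwa [this]

lemma choose_zeros {l0 r : List Int} (h : ∀ x ∈ l0, x = 0) :
    ∀ j, Choose (l0 ++ r) j ↔ Choose r j := by
  induction l0 with
  | nil => intro j; rfl
  | cons x l ih =>
      intro j
      have hx : x = 0 := h x (by simp)
      have h' : ∀ y ∈ l, y = 0 := fun y hy => h y (by simp [hy])
      simp only [List.cons_append, Choose, ih h', hx, sub_zero, or_self]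

-- grouped f a = f 1 copies of 1, …, f a copies of a
def grouped (f : Nat → Nat) : Nat → List Int
  | 0 => []
  | a + 1 => grouped f a ++ List.replicate (f (a + 1)) ((a : Int) + 1)

lemma choose_grouped (f : Nat → Nat) : ∀ a j, Choose (grouped f a) j ↔ GReach f a j := by
  intro a
  induction a with
  | zero => intro j; rfl
  | succ a ih =>
      intro j
      have hperm := choose_perm (List.perm_append_comm (l₁ := grouped f a) (l₂ := List.replicate (f (a + 1)) ((a : Int) + 1))) j
      simp only [grouped, GReach]
      rw [hperm, choose_replicate]
      constructor
      · rintro ⟨k, hk, h⟩; exact ⟨k, hk, (ih _).mp h⟩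
      · rintro ⟨k, hk, h⟩; exact ⟨k, hk, (ih _).mpr h⟩

lemma count_grouped (f : Nat → Nat) : ∀ a (x : Int),
    (grouped f a).count x = if 0 < x ∧ x ≤ (a : Int) then f x.toNat else 0 := by
  intro a
  induction a with
  | zero => intro x; simp [grouped]
  | succ a ih =>
      intro x
      rw [grouped, List.count_append, ih, List.count_replicate]
      by_cases hx : x = (a : Int) + 1
      · subst hx
        have h1 : ¬((0:Int) < (a:Int) + 1 ∧ (a:Int) + 1 ≤ (a:Int)) := by omega
        have h2 : (0:Int) < (a:Int) + 1 ∧ (a:Int) + 1 ≤ ((a+1 : Nat) : Int) := by push_cast; omega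
        have h3 : ((a:Int) + 1).toNat = a + 1 := by omega
        simp [h2, h3]
      · have h4 : ¬(((a:Int) + 1 == x) = true) := by simpa using fun h => hx h.symm
        have h5 : (0 < x ∧ x ≤ (a:Int)) ↔ (0 < x ∧ x ≤ ((a+1:Nat):Int)) := by push_cast; omega
        rw [if_neg h4, add_zero, if_congr h5 rfl rfl]

lemma greach_zero (f : Nat → Nat) : ∀ a, GReach f a 0 := by
  intro a
  induction a with
  | zero => rfl
  | succ a ih => exact ⟨0, by omega, by simpa using ih⟩

lemma greach_nonneg (f : Nat → Nat) : ∀ a {j}, GReach f a j → 0 ≤ j := by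
  intro a
  induction a with
  | zero => intro j h; simp [GReach] at h; omega
  | succ a ih =>
      rintro j ⟨k, _, h⟩
      have := ih h
      have : 0 ≤ (k : Int) * ((a : Int) + 1) := by positivity
      omega

lemma greach_skip (f : Nat → Nat) (a : Nat) (hf : f (a + 1) = 0) (j : Int) :
    GReach f (a + 1) j ↔ GReach f a j := by
  constructor
  · rintro ⟨k, hk, h⟩
    have : k = 0 := by omega
    subst this; simpa using h
  · intro h; exact ⟨0, by omega, by simpa using h⟩

-- ---------- EntrySpec: the value A's dp holds after a full executed stage ----------
-- k is the least number of copies of (a+1) completing j from values ≤ a, and k ≤ f (a+1)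
def MinRep (f : Nat → Nat) (a : Nat) (j : Int) (k : Nat) : Prop :=
  k ≤ f (a + 1) ∧ GReach f a (j - (k : Int) * ((a : Int) + 1)) ∧
    ∀ k' < k, ¬ GReach f a (j - (k' : Int) * ((a : Int) + 1))

def EntrySpec (f : Nat → Nat) (a : Nat) (j : Int) (x : Int) : Prop :=
  (¬ GReach f (a + 1) j ∧ x = -1) ∨ (∃ k, MinRep f a j k ∧ x = (f (a + 1) : Int) - (k : Int))

lemma greach_succ_iff_minrep (f : Nat → Nat) (a : Nat) (j : Int) :
    GReach f (a + 1) j ↔ ∃ k, MinRep f a j k := by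
  classical
  constructor
  · rintro ⟨k0, hk0, h0⟩
    have hex : ∃ k : Nat, GReach f a (j - (k : Int) * ((a : Int) + 1)) := ⟨k0, h0⟩
    refine ⟨Nat.find hex, ?_, Nat.find_spec hex, ?_⟩
    · have := Nat.find_min' hex h0
      omega
    · intro k' hk'
      exact Nat.find_min hex hk'
  · rintro ⟨k, hk, hg, _⟩
    exact ⟨k, hk, hg⟩

lemma entry_nonneg_iff {f : Nat → Nat} {a : Nat} {j : Int} {x : Int}
    (h : EntrySpec f a j x) : 0 ≤ x ↔ GReach f (a + 1) j := by
  rcases h with ⟨hn, hx⟩ | ⟨k, hk, hx⟩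
  · subst hx; simp [hn]
  · constructor
    · intro _; exact (greach_succ_iff_minrep f a j).mpr ⟨k, hk⟩
    · intro _; have := hk.1; omega

lemma entry_neg {f : Nat → Nat} {a : Nat} {j : Int} {x : Int}
    (h : EntrySpec f a j x) (hn : ¬ GReach f (a + 1) j) : x = -1 := by
  rcases h with ⟨_, hx⟩ | ⟨k, hk, hx⟩
  · exact hx
  · exact absurd ((greach_succ_iff_minrep f a j).mpr ⟨k, hk⟩) hn

lemma entry_case1 {f : Nat → Nat} {a : Nat} {j : Int} (h : GReach f a j) :
    EntrySpec f a j ((f (a + 1) : Int)) := by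
  refine Or.inr ⟨0, ⟨Nat.zero_le _, by simpa using h, by omega⟩, by simp⟩

lemma entry_case2 {f : Nat → Nat} {a : Nat} {j y : Int} (hna : ¬ GReach f a j)
    (hprev : EntrySpec f a (j - ((a : Int) + 1)) y) (hpos : 0 < y) :
    EntrySpec f a j (y - 1) := by
  rcases hprev with ⟨_, hy⟩ | ⟨k, ⟨hkc, hg, hmin⟩, hy⟩
  · omega
  · have hkc' : k < f (a + 1) := by omega
    refine Or.inr ⟨k + 1, ⟨by omega, ?_, ?_⟩, by push_cast; omega⟩
    · have : j - (↑(k + 1) : Int) * ((a : Int) + 1) = j - ((a : Int) + 1) - (k : Int) * ((a : Int) + 1) := by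
        push_cast; ring
      rwa [this]
    · rintro (_ | m) hm
      · simpa using hna
      · intro hgm
        refine hmin m (by omega) ?_
        have : j - ((a : Int) + 1) - (m : Int) * ((a : Int) + 1) = j - (↑(m + 1) : Int) * ((a : Int) + 1) := by
          push_cast; ring
        rwa [this]

lemma entry_case3 {f : Nat → Nat} {a : Nat} {j : Int} (hna : ¬ GReach f a j)
    (hside : ((a : Int) + 1) ≤ j → ∃ y, EntrySpec f a (j - ((a : Int) + 1)) y ∧ y ≤ 0) :
    EntrySpec f a j (-1) := by
  refine Or.inl ⟨?_, rfl⟩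
  intro hg
  rcases (greach_succ_iff_minrep f a j).mp hg with ⟨k, hkc, hgk, hmin⟩
  rcases k with _ | m
  · exact hna (by simpa using hgk)
  · have hj : ((a : Int) + 1) ≤ j := by
      have h0 := greach_nonneg f a hgk
      have h1 : (1 : Int) ≤ (↑(m + 1) : Int) := by push_cast; omega
      nlinarith
    rcases hside hj with ⟨y, hy, hy0⟩
    have hg' : GReach f a (j - ((a : Int) + 1) - (m : Int) * ((a : Int) + 1)) := by
      have : j - ((a : Int) + 1) - (m : Int) * ((a : Int) + 1) = j - (↑(m + 1) : Int) * ((a : Int) + 1) := by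
        push_cast; ring
      rwa [this]
    rcases hy with ⟨hn', _⟩ | ⟨k2, ⟨hk2c, hg2, hmin2⟩, hyv⟩
    · exact hn' ⟨m, by omega, hg'⟩
    · -- k2 is minimal, and m works, so k2 ≤ m; then y = c - k2 ≥ c - m ≥ 1
      have hk2m : k2 ≤ m := by
        by_contra hlt
        exact hmin2 m (by omega) hg'
      have : k2 ≤ f (a + 1) := hk2c
      omega

-- ---------- the inner loop invariant ----------
lemma getD_set_self (l : Array Int) (n : Nat) (v d : Int) (h : n < l.size) :
    (l.setIfInBounds n v).getD n d = v := by
  simp [Array.getD, Array.size_setIfInBounds, h]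

lemma getD_set_ne (l : Array Int) (n m : Nat) (v d : Int) (h : n ≠ m) :
    (l.setIfInBounds n v).getD m d = l.getD m d := by
  rw [Array.getD_eq_getD_getElem?, Array.getD_eq_getD_getElem?, Array.getElem?_setIfInBounds, if_neg h]

lemma getD_oob (l : Array Int) (d : Int) (n : Nat) (h : l.size ≤ n) : l.getD n d = d := by
  simp only [Array.getD]
  split
  · omega
  · rfl

lemma innerA_succ (c : Int) (a : Nat) (dp : Array Int) (t : Nat) :
    innerA c a dp (t + 1) = stepA c a (innerA c a dp t) t := by
  simp [innerA, List.range_succ]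

lemma outerA_succ (cnt : Array Int) (S : Nat) (dp : Array Int) (a : Nat) :
    outerA cnt S dp (a + 1) =
      if 0 < cnt.getD (a + 1) 0 then innerA (cnt.getD (a + 1) 0) (a + 1) (outerA cnt S dp a) S
      else outerA cnt S dp a := by
  simp [outerA, List.range_succ]

lemma finalA_succ (S : Int) (dp : Array Int) (t : Nat) :
    finalA S dp (t + 1) =
      if 0 ≤ dp.getD t (-1) then min (finalA S dp t) (S - 2 * (t : Int)) else finalA S dp t := by
  simp [finalA, List.range_succ]

lemma innerA_inv (f : Nat → Nat) (a S : Nat) (dp : Array Int)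
    (hlen : dp.size = S + 1)
    (hpre : ∀ j : Nat, (j < S ∨ j = 0) →
      ((0 ≤ dp.getD j (-1) ↔ GReach f a (j : Int)) ∧ (¬ GReach f a (j : Int) → dp.getD j (-1) = -1))) :
    ∀ t, t ≤ S →
      (innerA ((f (a + 1) : Int)) (a + 1) dp t).size = S + 1 ∧
      (∀ j : Nat, j < t → EntrySpec f a (j : Int) ((innerA ((f (a + 1) : Int)) (a + 1) dp t).getD j (-1))) ∧
      (∀ j : Nat, t ≤ j → (innerA ((f (a + 1) : Int)) (a + 1) dp t).getD j (-1) = dp.getD j (-1)) := by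
  intro t
  induction t with
  | zero => exact fun _ => ⟨hlen, fun j hj => absurd hj (Nat.not_lt_zero j), fun _ _ => rfl⟩
  | succ t ih =>
      intro ht
      obtain ⟨ihlen, ihdone, ihrest⟩ := ih (by omega)
      have htS : t < S := by omega
      set c : Int := (f (a + 1) : Int) with hc
      set dpt := innerA c (a + 1) dp t with hdpt
      have hcur : dpt.getD t (-1) = dp.getD t (-1) := ihrest t le_rfl
      have hstep : innerA c (a + 1) dp (t + 1) = stepA c (a + 1) dpt t := innerA_succ c (a + 1) dp t
      rw [hstep]
      unfold stepA
      by_cases h1 : 0 ≤ dpt.getD t (-1)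
      · -- dp[j] >= 0 : set dp[j] := count[a]
        have hg : GReach f a (t : Int) := by
          have := (hpre t (Or.inl htS)).1
          rw [hcur] at h1
          exact this.mp h1
        rw [if_pos h1]
        refine ⟨by simpa using ihlen, ?_, ?_⟩
        · intro j hj
          rcases Nat.lt_or_ge j t with hjt | hjt
          · rw [getD_set_ne _ _ _ _ _ (by omega)]
            exact ihdone j hjt
          · have hjeq : j = t := by omega
            subst hjeq
            rw [getD_set_self _ _ _ _ (by omega)]
            exact entry_case1 hg
        · intro j hj
          rw [getD_set_ne _ _ _ _ _ (by omega)]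
          exact ihrest j (by omega)
      · rw [if_neg h1]
        have hna : ¬ GReach f a (t : Int) := by
          intro hg
          exact h1 (by rw [hcur]; exact ((hpre t (Or.inl htS)).1.mpr hg))
        have hcurval : dpt.getD t (-1) = -1 := by
          rw [hcur]; exact (hpre t (Or.inl htS)).2 hna
        by_cases h2 : a + 1 ≤ t ∧ 0 < dpt.getD (t - (a + 1)) (-1)
        · -- elif j >= a and dp[j-a] > 0 : dp[j] := dp[j-a] - 1
          obtain ⟨hat, hpos⟩ := h2
          have hcast : ((t - (a + 1) : Nat) : Int) = (t : Int) - ((a : Int) + 1) := by omega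
          have hprev : EntrySpec f a ((t : Int) - ((a : Int) + 1)) (dpt.getD (t - (a + 1)) (-1)) := by
            have := ihdone (t - (a + 1)) (by omega)
            rwa [hcast] at this
          rw [if_pos ⟨hat, hpos⟩]
          refine ⟨by simpa using ihlen, ?_, ?_⟩
          · intro j hj
            rcases Nat.lt_or_ge j t with hjt | hjt
            · rw [getD_set_ne _ _ _ _ _ (by omega)]
              exact ihdone j hjt
            · have hjeq : j = t := by omega
              subst hjeq
              rw [getD_set_self _ _ _ _ (by omega)]
              exact entry_case2 hna hprev hpos
          · intro j hj
            rw [getD_set_ne _ _ _ _ _ (by omega)]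
            exact ihrest j (by omega)
        · -- else : dp[j] unchanged (= -1)
          rw [if_neg h2]
          refine ⟨ihlen, ?_, ?_⟩
          · intro j hj
            rcases Nat.lt_or_ge j t with hjt | hjt
            · exact ihdone j hjt
            · have hjeq : j = t := by omega
              rw [hjeq, hcurval]
              refine entry_case3 hna ?_
              intro hat
              have hat' : a + 1 ≤ t := by omega
              have hnpos : ¬ 0 < dpt.getD (t - (a + 1)) (-1) := fun hp => h2 ⟨hat', hp⟩
              refine ⟨dpt.getD (t - (a + 1)) (-1), ?_, by omega⟩
              have hcast : ((t - (a + 1) : Nat) : Int) = (t : Int) - ((a : Int) + 1) := by omega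
              have := ihdone (t - (a + 1)) (by omega)
              rwa [hcast] at this
          · intro j hj
            exact ihrest j (by omega)

-- ---------- the outer loop invariant ----------
lemma outerA_inv (f : Nat → Nat) (S : Nat) (cnt : Array Int)
    (hcnt : ∀ b : Nat, cnt.getD b 0 = (f b : Int)) (dp0 : Array Int)
    (hlen : dp0.size = S + 1)
    (hbase : ∀ j : Nat, (j < S ∨ j = 0) →
      ((0 ≤ dp0.getD j (-1) ↔ GReach f 0 (j : Int)) ∧ (¬ GReach f 0 (j : Int) → dp0.getD j (-1) = -1))) :
    ∀ a, (outerA cnt S dp0 a).size = S + 1 ∧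
      ∀ j : Nat, (j < S ∨ j = 0) →
        ((0 ≤ (outerA cnt S dp0 a).getD j (-1) ↔ GReach f a (j : Int)) ∧
         (¬ GReach f a (j : Int) → (outerA cnt S dp0 a).getD j (-1) = -1)) := by
  intro a
  induction a with
  | zero => exact ⟨hlen, hbase⟩
  | succ a ih =>
      obtain ⟨ihlen, ihspec⟩ := ih
      show (outerA cnt S dp0 (a + 1)).size = S + 1 ∧ _
      have hunf := outerA_succ cnt S dp0 a
      rw [hunf]
      by_cases hcond : 0 < cnt.getD (a + 1) 0
      · rw [if_pos hcond, hcnt (a + 1)]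
        obtain ⟨hl, hdone, hrest⟩ := innerA_inv f a S (outerA cnt S dp0 a) ihlen ihspec S le_rfl
        refine ⟨hl, ?_⟩
        intro j hj
        rcases hj with hj | hj
        · have hE := hdone j hj
          exact ⟨entry_nonneg_iff hE, entry_neg hE⟩
        · subst hj
          rcases Nat.eq_zero_or_pos S with hS0 | hSpos
          · subst hS0
            have hch : (innerA ((f (a+1) : Int)) (a + 1) (outerA cnt 0 dp0 a) 0).getD 0 (-1)
                = (outerA cnt 0 dp0 a).getD 0 (-1) := hrest 0 le_rfl
            rw [hch]
            have h00 := ihspec 0 (Or.inr rfl)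
            constructor
            · rw [h00.1]
              constructor
              · intro _; exact greach_zero f (a + 1)
              · intro _; exact greach_zero f a
            · intro hng; exact absurd (greach_zero f (a + 1)) (by simpa using hng)
          · have hE := hdone 0 hSpos
            exact ⟨entry_nonneg_iff hE, entry_neg hE⟩
      · rw [if_neg hcond]
        have hf0 : f (a + 1) = 0 := by
          have := hcnt (a + 1)
          omega
        refine ⟨ihlen, ?_⟩
        intro j hj
        have := ihspec j hj
        rw [greach_skip f a hf0]
        exact this

-- ---------- final scans, characterised as minima/maxima ----------
lemma finalA_char (S : Int) (dp : Array Int) (P : Nat → Prop)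
    (hdp : ∀ j : Nat, j < T → (0 ≤ dp.getD j (-1) ↔ P j)) :
    ∀ T', T' ≤ T →
      ((finalA S dp T' = S ∨ ∃ i : Nat, i < T' ∧ P i ∧ finalA S dp T' = S - 2 * (i : Int)) ∧
       ∀ i : Nat, i < T' → P i → finalA S dp T' ≤ S - 2 * (i : Int)) := by
  intro T'
  induction T' with
  | zero => exact fun _ => ⟨Or.inl rfl, fun i hi => absurd hi (Nat.not_lt_zero i)⟩
  | succ t ih =>
      intro ht
      obtain ⟨ihw, ihb⟩ := ih (by omega)
      have hunf := finalA_succ S dp t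
      rw [hunf]
      by_cases h : 0 ≤ dp.getD t (-1)
      · have hPt : P t := (hdp t (by omega)).mp h
        rw [if_pos h]
        constructor
        · rcases le_total (finalA S dp t) (S - 2 * (t : Int)) with hle | hle
          · rw [min_eq_left hle]
            rcases ihw with hw | ⟨i, hi, hPi, hv⟩
            · exact Or.inl hw
            · exact Or.inr ⟨i, by omega, hPi, hv⟩
          · rw [min_eq_right hle]
            exact Or.inr ⟨t, by omega, hPt, rfl⟩
        · intro i hi hPi
          rcases Nat.lt_or_ge i t with hit | hit
          · exact le_trans (min_le_left _ _) (ihb i hit hPi)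
          · have : i = t := by omega
            subst this
            exact min_le_right _ _
      · rw [if_neg h]
        constructor
        · rcases ihw with hw | ⟨i, hi, hPi, hv⟩
          · exact Or.inl hw
          · exact Or.inr ⟨i, by omega, hPi, hv⟩
        · intro i hi hPi
          rcases Nat.lt_or_ge i t with hit | hit
          · exact ihb i hit hPi
          · have hit' : i = t := by omega
            rw [hit'] at hPi
            exact absurd ((hdp t (by omega)).mpr hPi) h

lemma bestFold_char (S : Int) : ∀ (L : List Int) (b0 : Int),
    (bestFold S L b0 = b0 ∨ (bestFold S L b0 ∈ L ∧ 2 * bestFold S L b0 ≤ S)) ∧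
    b0 ≤ bestFold S L b0 ∧ ∀ x ∈ L, 2 * x ≤ S → x ≤ bestFold S L b0 := by
  intro L
  induction L with
  | nil => exact fun b0 => ⟨Or.inl rfl, le_refl _, by simp⟩
  | cons v L ih =>
      intro b0
      have hunf : bestFold S (v :: L) b0 = bestFold S L (if 2 * v ≤ S ∧ b0 < v then v else b0) := rfl
      rw [hunf]
      set b1 : Int := if 2 * v ≤ S ∧ b0 < v then v else b0 with hb1
      obtain ⟨ihw, ihge, ihb⟩ := ih b1
      have hb01 : b0 ≤ b1 := by rw [hb1]; split_ifs with h <;> omega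
      refine ⟨?_, le_trans hb01 ihge, ?_⟩
      · rcases ihw with hw | ⟨hmem, hle⟩
        · rw [hw, hb1]
          split_ifs with h
          · exact Or.inr ⟨by simp, h.1⟩
          · exact Or.inl rfl
        · exact Or.inr ⟨by simp [hmem], hle⟩
      · intro x hx hxS
        rcases List.mem_cons.mp hx with hx | hx
        · subst hx
          have : x ≤ b1 := by rw [hb1]; split_ifs with h <;> [exact le_refl x; omega]
          exact le_trans this ihge
        · exact ihb x hx hxS

-- ---------- reach set membership ----------
lemma mem_reachFold : ∀ (l : List Int) (s : PySem.Set Int) (x : Int),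
    x ∈ reachFold l s ↔ ∃ y ∈ s, Choose l (x - y) := by
  intro l
  induction l with
  | nil =>
      intro s x
      constructor
      · intro h; exact ⟨x, h, by simp [Choose]⟩
      · rintro ⟨y, hy, h⟩
        have : x = y := by simpa [Choose] using (by omega : x - y = 0 → x = y) h
        rwa [this]
  | cons v l ih =>
      intro s x
      have hunf : reachFold (v :: l) s = reachFold l (PySem.Set.union s (s.map (fun r => r + v))) := rfl
      rw [hunf, ih]
      constructor
      · rintro ⟨y, hy, h⟩
        rcases (PySem.Set.mem_union _ _ _).mp hy with hy | hy
        · exact ⟨y, hy, Or.inl h⟩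
        · rcases List.mem_map.mp hy with ⟨r, hr, rfl⟩
          refine ⟨r, hr, Or.inr ?_⟩
          have : x - r - v = x - (r + v) := by ring
          rwa [this]
      · rintro ⟨y, hy, h | h⟩
        · exact ⟨y, (PySem.Set.mem_union _ _ _).mpr (Or.inl hy), h⟩
        · refine ⟨y + v, (PySem.Set.mem_union _ _ _).mpr (Or.inr (List.mem_map.mpr ⟨y, hy, rfl⟩)), ?_⟩
          have : x - (y + v) = x - y - v := by ring
          rwa [this]

-- ---------- count array characterisation ----------
lemma buildCnt_getD : ∀ (l : List Int) (acc : Array Int), (∀ v ∈ l, 0 ≤ v ∧ v.toNat < acc.size) →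
    ∀ b : Nat, b < acc.size →
      (buildCnt l acc).getD b 0 = acc.getD b 0 + (l.count (b : Int) : Int) := by
  intro l
  induction l with
  | nil => intro acc _ b _; simp [buildCnt]
  | cons v l ih =>
      intro acc hdom b hb
      obtain ⟨hv0, hvlt⟩ := hdom v (by simp)
      have hunf : buildCnt (v :: l) acc = buildCnt l (acc.setIfInBounds v.toNat (acc.getD v.toNat 0 + 1)) := rfl
      rw [hunf]
      have hlen' : (acc.setIfInBounds v.toNat (acc.getD v.toNat 0 + 1)).size = acc.size := by simp
      rw [ih _ (by rw [hlen']; exact fun w hw => hdom w (by simp [hw])) b (by omega)]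
      by_cases hvb : v.toNat = b
      · subst hvb
        rw [getD_set_self _ _ _ _ hb, List.count_cons,
          if_pos (by simpa using (by omega : v = (v.toNat : Int)))]
        push_cast
        omega
      · have hvb' : ¬ (v = (b : Int)) := by omega
        rw [getD_set_ne _ _ _ _ _ hvb, List.count_cons, if_neg (by simpa using hvb')]
        omega

lemma buildCnt_length : ∀ (l : List Int) (acc : Array Int), (buildCnt l acc).size = acc.size := by
  intro l
  induction l with
  | nil => intro acc; rfl
  | cons v l ih =>
      intro acc
      have hunf : buildCnt (v :: l) acc = buildCnt l (acc.setIfInBounds v.toNat (acc.getD v.toNat 0 + 1)) := rfl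
      rw [hunf, ih]
      simp

-- ---------- foldl max facts ----------
lemma init_le_foldl_max : ∀ (l : List Int) (i : Int), i ≤ l.foldl max i := by
  intro l
  induction l with
  | nil => intro i; simp
  | cons v l ih => intro i; exact le_trans (le_max_left i v) (ih (max i v))

lemma le_foldl_max_of_mem : ∀ (l : List Int) (i x : Int), x ∈ l → x ≤ l.foldl max i := by
  intro l
  induction l with
  | nil => intro i x h; simp at h
  | cons v l ih =>
      intro i x h
      rcases List.mem_cons.mp h with h | h
      · subst h; exact le_trans (le_max_right i x) (init_le_foldl_max l _)
      · exact ih _ x h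

-- ---------- Choose ↔ GReach for vals ----------
lemma choose_iff_greach (vals : List Int) (hnn : ∀ v ∈ vals, 0 ≤ v)
    (M : Int) (hM : M = vals.foldl max 0) (j : Int) :
    Choose vals j ↔ GReach (fun b => vals.count (b : Int)) M.toNat j := by
  have hM0 : 0 ≤ M := hM ▸ init_le_foldl_max vals 0
  have hub : ∀ v ∈ vals, v ≤ M := fun v hv => hM ▸ le_foldl_max_of_mem vals 0 v hv
  have h1 : Choose vals j ↔ Choose (vals.filter (fun v => v == 0) ++ vals.filter (fun v => !(v == 0))) j :=
    (choose_perm (List.filter_append_perm (fun v => v == 0) vals) j).symm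
  have h2 : Choose (vals.filter (fun v => v == 0) ++ vals.filter (fun v => !(v == 0))) j ↔
      Choose (vals.filter (fun v => !(v == 0))) j := by
    refine choose_zeros ?_ j
    intro x hx
    have := (List.mem_filter.mp hx).2
    simpa using this
  have hperm : (vals.filter (fun v => !(v == 0))).Perm (grouped (fun b => vals.count (b : Int)) M.toNat) := by
    rw [List.perm_iff_count]
    intro x
    rw [count_grouped]
    by_cases hx0 : 0 < x ∧ x ≤ ((M.toNat : Nat) : Int)
    · rw [if_pos hx0]
      rw [List.count_filter (by simp; omega)]
      have hxc : ((x.toNat : Nat) : Int) = x := by omega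
      simp only [hxc]
    · rw [if_neg hx0]
      refine List.count_eq_zero.mpr ?_
      intro hmem
      obtain ⟨hv, hpx⟩ := List.mem_filter.mp hmem
      have hxn : ¬ (x = 0) := by simpa using hpx
      have h3 := hnn x hv
      have h4 := hub x hv
      omega
  rw [h1, h2, choose_perm hperm j, choose_grouped]

-- ---------- main assembly ----------
lemma getD_replicate' (n : Nat) (a d : Int) (m : Nat) (h : m < n) :
    (Array.replicate n a).getD m d = a := by
  simp [Array.getD, h]

-- ===== VERDICT (by name: the statement is the Claim_ definition above) =====
theorem official_solution_spec : Claim_equal_official_solution := by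
  intro A _
  unfold Spec_official_solution
  set vals : List Int := A.map (fun x => |x|) with hvals
  set M : Int := vals.foldl max 0 with hM
  set S : Int := vals.sum with hS
  set f : Nat → Nat := fun b => vals.count ((b : Int)) with hf
  have hnn : ∀ v ∈ vals, 0 ≤ v := by
    intro v hv
    rcases List.mem_map.mp hv with ⟨x, _, rfl⟩
    exact abs_nonneg x
  have hub : ∀ v ∈ vals, v ≤ M := fun v hv => le_foldl_max_of_mem vals 0 v hv
  have hM0 : 0 ≤ M := init_le_foldl_max vals 0
  have hS0 : 0 ≤ S := List.sum_nonneg hnn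
  have hSc : ((S.toNat : Nat) : Int) = S := by omega
  -- A's side
  set cnt : Array Int := buildCnt vals (Array.replicate (M.toNat + 1) 0) with hcnt
  set dp0 : Array Int := (Array.replicate (S.toNat + 1) (-1 : Int)).setIfInBounds 0 0 with hdp0
  have hcntspec : ∀ b : Nat, cnt.getD b 0 = (f b : Int) := by
    intro b
    by_cases hbM : b ≤ M.toNat
    · have hb : b < (Array.replicate (M.toNat + 1) (0 : Int)).size := by simp; omega
      rw [hcnt, buildCnt_getD vals _ (fun v hv => ⟨hnn v hv, by
          simp only [Array.size_replicate]
          have := hub v hv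
          omega⟩) b hb]
      rw [getD_replicate' _ _ _ _ (by omega)]
      simp [hf]
    · have hlc : cnt.size = M.toNat + 1 := by
        rw [hcnt, buildCnt_length]; simp
      rw [getD_oob _ _ _ (by omega)]
      have hf0 : f b = 0 := by
        refine List.count_eq_zero.mpr ?_
        intro hmem
        have h1 := hub _ hmem
        omega
      simp [hf0]
  have hlen0 : dp0.size = S.toNat + 1 := by simp [hdp0]
  have hbase : ∀ j : Nat, (j < S.toNat ∨ j = 0) →
      ((0 ≤ dp0.getD j (-1) ↔ GReach f 0 (j : Int)) ∧ (¬ GReach f 0 (j : Int) → dp0.getD j (-1) = -1)) := by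
    intro j hj
    by_cases hj0 : j = 0
    · subst hj0
      have hv : dp0.getD 0 (-1) = 0 := by
        rw [hdp0, getD_set_self _ _ _ _ (by simp)]
      rw [hv]
      constructor
      · simp [GReach]
      · intro hg
        exact absurd (by simp [GReach] : GReach f 0 ((0 : Nat) : Int)) hg
    · have hv : dp0.getD j (-1) = -1 := by
        rw [hdp0, getD_set_ne _ _ _ _ _ (by omega), getD_replicate' _ _ _ _ (by omega)]
      rw [hv]
      have hng : ¬ GReach f 0 (j : Int) := by simp [GReach]; omega
      constructor
      · simp [hng]
      · intro _; rfl
  obtain ⟨-, hspec⟩ := outerA_inv f S.toNat cnt hcntspec dp0 hlen0 hbase M.toNat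
  set dp : Array Int := outerA cnt S.toNat dp0 M.toNat with hdp
  set T : Nat := S.toNat / 2 + 1 with hT
  have hdpchar : ∀ j : Nat, j < T → (0 ≤ dp.getD j (-1) ↔ GReach f M.toNat (j : Int)) := by
    intro j hj
    exact (hspec j (by omega)).1
  obtain ⟨hAw, hAb⟩ := finalA_char S dp (fun i => GReach f M.toNat (i : Int)) hdpchar T le_rfl
  have hA : official_solution A = finalA S dp T := rfl
  -- B's side
  set reach : PySem.Set Int := reachFold vals (PySem.Set.ofList [0]) with hreach
  have hmem : ∀ x : Int, x ∈ reach ↔ Choose vals x := by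
    intro x
    rw [hreach, mem_reachFold]
    constructor
    · rintro ⟨y, hy, h⟩
      have hy0 : y = 0 := by simpa [PySem.Set.mem_ofList] using hy
      subst hy0
      simpa using h
    · intro h
      exact ⟨0, by simp [PySem.Set.mem_ofList], by simpa using h⟩
  obtain ⟨hBw, hB0, hBb⟩ := bestFold_char S reach 0
  have hB : official_solution_alt A = S - 2 * bestFold S reach 0 := rfl
  rw [hA, hB]
  have hiff : ∀ x : Int, Choose vals x ↔ GReach f M.toNat x := fun x => choose_iff_greach vals hnn M hM x
  apply le_antisymm
  · rcases hBw with hb0 | ⟨hbm, hbS⟩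
    · have h0 := hAb 0 (by omega) (greach_zero f M.toNat)
      rw [hb0]
      simpa using h0
    · set best : Int := bestFold S reach 0 with hbest2
      have hch : Choose vals best := (hmem best).mp hbm
      have hbnn : 0 ≤ best := choose_nonneg hnn hch
      have hg : GReach f M.toNat ((best.toNat : Nat) : Int) := by
        rw [(by omega : ((best.toNat : Nat) : Int) = best)]
        exact (hiff best).mp hch
      have hlt : best.toNat < T := by omega
      have := hAb best.toNat hlt hg
      have hcast : ((best.toNat : Nat) : Int) = best := by omega
      rw [hcast] at this
      exact this
  · rcases hAw with hw | ⟨i, hi, hPi, hv⟩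
    · rw [hw]; omega
    · rw [hv]
      have hch : Choose vals (i : Int) := (hiff _).mpr hPi
      have hmm : (i : Int) ∈ reach := (hmem _).mpr hch
      have h2i : 2 * (i : Int) ≤ S := by omega
      have := hBb (i : Int) hmm h2i
      omega
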